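-- pv_equiv track=rewrite | github.com/ResidualResidue/simple-wordlist-generator | src/helpers/wordlist_parser.py | l33tify_string
-- ===== SOURCE A (Python) =====
-- from itertools import product
--
-- def l33tify_string(line: str) -> list:
--     l33t_map = {
--         'a': ("4",),
--         'b': ("8",),
--         'e': ("3",),
--         'i': ("1", "!"),
--         'l': ("1",),
--         'o': ("0",),
--         's': ("5", "$"),
--         'z': ("5",),
--         't': ("7",)
--     }
--
--     # Create a list of lists where each character in the word has corresponding l33t equivalents or itself
--     options = []
--     for char in line:
--         if char.lower() in l33t_map:  # Check if the character has l33t equivalents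
--             l33t_equivalents = l33t_map[char.lower()]
--             options.append([char] + list(l33t_equivalents))
--         else:
--             options.append([char])  # Use the character as is if no l33t equivalent exists
--
--     # Generate all combinations using Cartesian product
--     permutations = [''.join(p) for p in product(*options)]
--
--     return permutations
-- ===== SOURCE B (Python) =====
-- def l33tify_string(line: str) -> list:
--     l33t_map = {
--         'a': ("4",),
--         'b': ("8",),
--         'e': ("3",),
--         'i': ("1", "!"),
--         'l': ("1",),
--         'o': ("0",),
--         's': ("5", "$"),
--         'z': ("5",),
--         't': ("7",)
--     }
--     # Mixed-radix enumeration: each output is addressed by an integer index,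
--     # decoded digit by digit via divmod; no intermediate combination lists.
--     opts = []
--     total = 1
--     for c in line:
--         o = (c,) + l33t_map.get(c.lower(), ())
--         opts.append(o)
--         total *= len(o)
--     result = []
--     for k in range(total):
--         r = k
--         chars = []
--         for o in reversed(opts):
--             r, d = divmod(r, len(o))
--             chars.append(o[d])
--         result.append(''.join(reversed(chars)))
--     return result
-- ===== Notes on version B (the rewrite author's own statement) =====
-- stated objective: alternative
-- what changed: Replaces itertools.product over an options table with mixed-radix index enumeration: B computes the total count of combinations and decodes each index k into one output string via a divmod chain over the per-character radices, never materialising tuples or intermediate combination lists.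
import Mathlib
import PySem

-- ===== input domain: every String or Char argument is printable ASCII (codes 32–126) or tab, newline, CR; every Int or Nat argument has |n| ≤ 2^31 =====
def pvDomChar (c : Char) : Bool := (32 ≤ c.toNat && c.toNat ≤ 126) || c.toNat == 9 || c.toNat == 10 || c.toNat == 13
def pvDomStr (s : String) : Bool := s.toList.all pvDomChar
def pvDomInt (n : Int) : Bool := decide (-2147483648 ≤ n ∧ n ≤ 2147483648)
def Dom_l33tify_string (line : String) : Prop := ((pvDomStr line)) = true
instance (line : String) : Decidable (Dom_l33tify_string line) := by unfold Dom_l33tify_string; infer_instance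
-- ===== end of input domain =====

-- ===== PORT A =====
-- B replaces itertools.product over an options table by mixed-radix index decoding
-- (count the combinations, decode each index by a divmod chain); objective: alternative algorithm.

-- the l33t map shared by both Pythons, as a Dict from lowercase char to its equivalent single-char strings
def l33tMap : PySem.Dict Char (List String) :=
  PySem.Dict.ofList [('a', ["4"]), ('b', ["8"]), ('e', ["3"]), ('i', ["1", "!"]),
    ('l', ["1"]), ('o', ["0"]), ('s', ["5", "$"]), ('z', ["5"]), ('t', ["7"])]

-- A: options row for one character ([char] + list(l33t_equivalents), else [char])
def optionsA (c : Char) : List String :=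
  match l33tMap.get? c.toLower with
  | some eq => [String.ofList [c]] ++ eq
  | none => [String.ofList [c]]

-- A: itertools.product(*options), tuples in lexicographic order (last component varies fastest)
def prodA : List (List String) → List (List String)
  | [] => [[]]
  | o :: rest => o.flatMap (fun x => (prodA rest).map (fun p => x :: p))

def l33tify_string (line : String) : List String :=
  (prodA (line.toList.map optionsA)).map (fun p => String.join p)

-- ===== PORT B =====
-- B: o = (c,) + l33t_map.get(c.lower(), ())
def optionsB (c : Char) : List String :=
  String.ofList [c] :: l33tMap.getD c.toLower []

-- Source B: build opts and total in one pass, then decode every index k in range(total) by the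
-- reversed divmod chain. k and each len(o) are nonnegative, where Python's divmod coincides
-- with Nat division/modulo (exact here); o[d] always has 0 ≤ d < len(o), so getD is exact.
def l33tify_string_alt (line : String) : List String :=
  let opts := line.toList.map optionsB
  let total := opts.foldl (fun t o => t * o.length) 1
  (List.range total).map (fun k =>
    let st := opts.reverse.foldl
      (fun (st : Nat × List String) o => (st.1 / o.length, st.2 ++ [o.getD (st.1 % o.length) ""]))
      (k, [])
    String.join st.2.reverse)

-- ===== PRECONDITION & SPEC =====
def Spec_l33tify_string (line : String) (out : List String) : Prop := out = l33tify_string_alt line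
instance (line : String) (out : List String) : Decidable (Spec_l33tify_string line out) := by unfold Spec_l33tify_string; infer_instance

-- ===== CLAIM (what is proved, stated in full; the proofs are below) =====
def Claim_equal_l33tify_string : Prop := ∀ (line : String), Dom_l33tify_string line → Spec_l33tify_string line (l33tify_string line)

-- ===== LEMMAS AND PROOFS =====

theorem optionsB_eq (c : Char) : optionsB c = optionsA c := by
  unfold optionsA optionsB PySem.Dict.getD
  cases l33tMap.get? c.toLower <;> simp

-- product of the radices
def PP (opts : List (List String)) : Nat := (opts.map List.length).prod

-- Source B's divmod chain, foldr form (= foldl over the reversed list)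
def FB (opts : List (List String)) (k : Nat) : Nat × List String :=
  opts.foldr (fun o st => (st.1 / o.length, st.2 ++ [o.getD (st.1 % o.length) ""])) (k, [])

def decodeB (opts : List (List String)) (k : Nat) : String :=
  String.join (FB opts k).2.reverse

theorem strFoldl_append (p : List String) : ∀ (s : String),
    p.foldl (fun r t => r ++ t) s = s ++ p.foldl (fun r t => r ++ t) "" := by
  induction p with
  | nil => intro s; simp
  | cons a p ih =>
    intro s
    simp only [List.foldl_cons]
    rw [ih (s ++ a), ih ("" ++ a)]
    simp [String.append_assoc]

theorem join_cons (s : String) (l : List String) :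
    String.join (s :: l) = s ++ String.join l := by
  simp only [String.join, List.foldl_cons]
  rw [strFoldl_append l ("" ++ s)]
  simp

theorem FB_fst (opts : List (List String)) (k : Nat) : (FB opts k).1 = k / PP opts := by
  induction opts generalizing k with
  | nil => simp [FB, PP]
  | cons o rest ih =>
    simp only [FB, List.foldr_cons, PP, List.map_cons, List.prod_cons]
    show (FB rest k).1 / o.length = _
    rw [ih, Nat.div_div_eq_div_mul, Nat.mul_comm]
    rfl

theorem decodeB_cons (o : List String) (rest : List (List String)) (k : Nat) :
    decodeB (o :: rest) k
      = o.getD ((k / PP rest) % o.length) "" ++ decodeB rest k := by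
  simp only [decodeB, FB, List.foldr_cons]
  show String.join (((FB rest k).2 ++ [o.getD ((FB rest k).1 % o.length) ""]).reverse) = _
  rw [FB_fst, List.reverse_append]
  simp [join_cons, FB]

theorem PP_pos (opts : List (List String)) (h : ∀ o ∈ opts, 0 < o.length) : 0 < PP opts := by
  induction opts with
  | nil => simp [PP]
  | cons o rest ih =>
    simp only [PP, List.map_cons, List.prod_cons]
    exact Nat.mul_pos (h o (by simp)) (ih (fun x hx => h x (by simp [hx])))

theorem decodeB_mod (opts : List (List String)) (h : ∀ o ∈ opts, 0 < o.length) :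
    ∀ (a k : Nat), decodeB opts (a * PP opts + k) = decodeB opts k := by
  induction opts with
  | nil => intro a k; rfl
  | cons o rest ih =>
    intro a k
    have hP : 0 < PP rest := PP_pos rest (fun x hx => h x (by simp [hx]))
    have hPPc : PP (o :: rest) = o.length * PP rest := by
      simp [PP]
    rw [decodeB_cons, decodeB_cons, hPPc]
    have h1 : (a * (o.length * PP rest) + k) / PP rest = a * o.length + k / PP rest := by
      rw [← Nat.mul_assoc, Nat.add_comm, Nat.add_mul_div_right _ _ hP, Nat.add_comm]
    have h2 : decodeB rest (a * (o.length * PP rest) + k) = decodeB rest k := by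
      rw [← Nat.mul_assoc]
      exact ih (fun x hx => h x (by simp [hx])) (a * o.length) k
    have h3 : (a * o.length + k / PP rest) % o.length = k / PP rest % o.length := by
      rw [Nat.add_comm, Nat.add_mul_mod_self_right]
    rw [h1, h2, h3]

theorem range_mul_flatMap (a b : Nat) :
    List.range (a * b) = (List.range a).flatMap (fun i => (List.range b).map (fun j => i * b + j)) := by
  induction a with
  | zero => simp
  | succ a ih =>
    rw [Nat.succ_mul, List.range_add, ih, List.range_succ, List.flatMap_append]
    simp

theorem map_getD_range {α : Type} (l : List α) (d : α) :
    (List.range l.length).map (fun i => l.getD i d) = l := by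
  induction l with
  | nil => simp
  | cons x l ih =>
    rw [List.length_cons, List.range_succ_eq_map]
    simp only [List.map_cons, List.map_map]
    rw [show ((fun i => (x :: l).getD i d) ∘ Nat.succ) = (fun i => l.getD i d) from rfl]
    rw [ih]
    rfl

theorem main_enum (opts : List (List String)) (h : ∀ o ∈ opts, 0 < o.length) :
    (List.range (PP opts)).map (decodeB opts) = (prodA opts).map String.join := by
  induction opts with
  | nil =>
    simp [PP, prodA, decodeB, FB, String.join]
  | cons o rest ih =>
    have hrest : ∀ x ∈ rest, 0 < x.length := fun x hx => h x (by simp [hx])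
    have hP : 0 < PP rest := PP_pos rest hrest
    have hPPc : PP (o :: rest) = o.length * PP rest := by simp [PP]
    rw [hPPc, range_mul_flatMap, List.map_flatMap]
    have step : ∀ i ∈ List.range o.length,
        ((List.range (PP rest)).map (fun j => i * PP rest + j)).map (decodeB (o :: rest))
          = (prodA rest).map (fun p => o.getD i "" ++ String.join p) := by
      intro i hi
      rw [List.mem_range] at hi
      rw [List.map_map]
      have : ∀ j ∈ List.range (PP rest),
          decodeB (o :: rest) (i * PP rest + j) = o.getD i "" ++ decodeB rest j := by
        intro j hj
        rw [List.mem_range] at hj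
        rw [decodeB_cons]
        have h1 : (i * PP rest + j) / PP rest = i := by
          rw [Nat.add_comm, Nat.add_mul_div_right _ _ hP, Nat.div_eq_of_lt hj]
          omega
        have h2 : decodeB rest (i * PP rest + j) = decodeB rest j := decodeB_mod rest hrest i j
        rw [h1, Nat.mod_eq_of_lt hi, h2]
      simp only [Function.comp_def]
      rw [List.map_congr_left this,
        show (fun j => o.getD i "" ++ decodeB rest j)
          = ((fun s => o.getD i "" ++ s) ∘ decodeB rest) from rfl,
        ← List.map_map, ih hrest, List.map_map]
      simp [Function.comp_def]
    rw [List.flatMap_congr step]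
    have : (prodA (o :: rest)).map String.join
        = o.flatMap (fun x => (prodA rest).map (fun p => x ++ String.join p)) := by
      simp only [prodA, List.map_flatMap, List.map_map]
      apply List.flatMap_congr
      intro x _
      apply List.map_congr_left
      intro p _
      simp [Function.comp, join_cons]
    rw [this]
    conv_rhs => rw [← map_getD_range o ""]
    rw [List.flatMap_map]

theorem foldl_mul (opts : List (List String)) : ∀ (t : Nat),
    opts.foldl (fun t o => t * o.length) t = t * PP opts := by
  induction opts with
  | nil => intro t; simp [PP]
  | cons o rest ih =>
    intro t
    simp only [List.foldl_cons, PP, List.map_cons, List.prod_cons]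
    rw [ih]
    simp [PP, Nat.mul_assoc]

theorem optionsB_pos (c : Char) : 0 < (optionsB c).length := by
  simp [optionsB]

-- ===== VERDICT (by name: the statement is the Claim_ definition above) =====
theorem l33tify_string_spec : Claim_equal_l33tify_string := by
  intro line _
  unfold Spec_l33tify_string l33tify_string l33tify_string_alt
  simp only []
  rw [foldl_mul _ 1, Nat.one_mul]
  have hfold : ∀ k, ((line.toList.map optionsB).reverse.foldl
      (fun (st : Nat × List String) o => (st.1 / o.length, st.2 ++ [o.getD (st.1 % o.length) ""]))
      (k, [])) = FB (line.toList.map optionsB) k := by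
    intro k
    rw [List.foldl_reverse]
    rfl
  have hopts : line.toList.map optionsB = line.toList.map optionsA := by
    exact List.map_congr_left (fun c _ => optionsB_eq c)
  calc (prodA (line.toList.map optionsA)).map (fun p => String.join p)
      = (List.range (PP (line.toList.map optionsB))).map (decodeB (line.toList.map optionsB)) := by
        rw [main_enum _ (by intro o ho; rw [List.mem_map] at ho; obtain ⟨c, _, rfl⟩ := ho; exact optionsB_pos c), hopts]
    _ = _ := by
        apply List.map_congr_left
        intro k _
        rw [hfold k]
        rfl
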